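-- pv_equiv track=rewrite | github.com/lingpy/lingrex | src/lingrex/semirex.py | to_super
-- ===== SOURCE A (Python) =====
-- def to_super(number):
--     string = str(number)
--     st = list(zip(
--         '¹²³⁴⁵⁶⁷⁸⁹⁰',
--         '1234567890'))
--     for s, t in st:
--         string = string.replace(t, s)
--     return string
-- ===== SOURCE B (Python) =====
-- SUPS = '⁰¹²³⁴⁵⁶⁷⁸⁹'
--
-- def to_super(number):
--     out = []
--     for c in str(number):
--         if '0' <= c <= '9':
--             out.append(SUPS[ord(c) - ord('0')])
--         else:
--             out.append(c)
--     return ''.join(out)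
-- ===== Notes on version B (the rewrite author's own statement) =====
-- stated objective: simpler
-- what changed: Replaces ten sequential str.replace passes over the whole string by a single pass over the characters of str(number) that detects a digit by an ordinal range test and indexes the superscript alphabet by ord(c)-ord('0').
import Mathlib
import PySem

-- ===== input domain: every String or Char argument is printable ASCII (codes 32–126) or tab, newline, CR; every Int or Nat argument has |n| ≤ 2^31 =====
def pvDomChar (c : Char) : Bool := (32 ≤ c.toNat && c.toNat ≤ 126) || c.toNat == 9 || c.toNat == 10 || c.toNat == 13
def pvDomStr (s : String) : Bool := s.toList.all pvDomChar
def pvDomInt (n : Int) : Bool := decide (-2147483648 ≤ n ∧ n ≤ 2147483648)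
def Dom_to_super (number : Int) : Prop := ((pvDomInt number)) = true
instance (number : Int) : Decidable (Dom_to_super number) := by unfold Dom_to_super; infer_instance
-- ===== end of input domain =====

-- B does one pass over str(number), detecting digits by ordinal range and indexing the superscript alphabet arithmetically, instead of A's ten replace passes; return values proved equal for all Int.

-- ===== PORT A =====
def to_super (number : Int) : String :=
  let string := PySem.Int.toStr number
  let st : List (Char × Char) :=
    [('¹','1'),('²','2'),('³','3'),('⁴','4'),('⁵','5'),
     ('⁶','6'),('⁷','7'),('⁸','8'),('⁹','9'),('⁰','0')]
  st.foldl (fun string p => PySem.Str.replace string (String.ofList [p.2]) (String.ofList [p.1])) string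

-- ===== PORT B =====
-- the superscript alphabet SUPS, indexed by digit value
def pvSups : List Char := ['⁰','¹','²','³','⁴','⁵','⁶','⁷','⁸','⁹']

-- the for-loop of Source B: recursion over the characters, appending one output char each step
def supLoop : List Char → List Char
  | [] => []
  | c :: rest =>
      (if 48 ≤ c.toNat ∧ c.toNat ≤ 57 then pvSups.getD (c.toNat - 48) c else c) :: supLoop rest

def to_super_alt (number : Int) : String :=
  String.ofList (supLoop (PySem.Int.toStr number).toList)

-- ===== PRECONDITION & SPEC =====
def Spec_to_super (number : Int) (out : String) : Prop := out = to_super_alt number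
instance (number : Int) (out : String) : Decidable (Spec_to_super number out) := by unfold Spec_to_super; infer_instance

-- ===== CLAIM (what is proved, stated in full; the proofs are below) =====
def Claim_equal_to_super : Prop := ∀ (number : Int), Dom_to_super number → Spec_to_super number (to_super number)

-- ===== LEMMAS AND PROOFS =====

-- single-character replace is a map over the characters
lemma replace_go_single (t s : Char) :
    ∀ (fuel : Nat) (l acc : List Char), l.length ≤ fuel →
      PySem.Chars.replace.go [t] [s] fuel l acc
        = acc.reverse ++ l.map (fun c => if c == t then s else c) := by
  intro fuel
  induction fuel with
  | zero =>
    intro l acc h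
    have : l = [] := List.eq_nil_of_length_eq_zero (Nat.le_zero.mp h)
    subst this
    simp [PySem.Chars.replace.go]
  | succ n ih =>
    intro l acc h
    cases l with
    | nil => simp [PySem.Chars.replace.go]
    | cons c t' =>
      simp only [PySem.Chars.replace.go]
      by_cases hc : c = t
      · subst hc
        have hp : List.isPrefixOf [c] (c :: t') = true := by simp [List.isPrefixOf]
        rw [if_pos hp]
        have := ih t' (s :: acc) (by simpa using Nat.le_of_succ_le_succ h)
        rw [show (List.drop [c].length (c :: t')) = t' from rfl,
            show ([s].reverse ++ acc) = s :: acc from rfl, this]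
        simp
      · have hp : List.isPrefixOf [t] (c :: t') = false := by
          simp [List.isPrefixOf]; exact fun h' => absurd h'.symm hc
        rw [if_neg (by simp [hp])]
        rw [ih t' (c :: acc) (by simpa using Nat.le_of_succ_le_succ h)]
        simp [hc]

lemma replace_single (cs : List Char) (t s : Char) :
    PySem.Chars.replace cs [t] [s] = cs.map (fun c => if c == t then s else c) := by
  simp only [PySem.Chars.replace, List.isEmpty]
  rw [if_neg (by simp)]
  simpa using replace_go_single t s cs.length cs [] le_rfl

lemma str_replace_single (s : String) (t r : Char) :
    PySem.Str.replace s (String.ofList [t]) (String.ofList [r])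
      = String.ofList (s.toList.map (fun c => if c == t then r else c)) := by
  simp [PySem.Str.replace, replace_single]

-- B's loop is a map over the characters
lemma supLoop_eq_map (l : List Char) :
    supLoop l = l.map (fun c =>
      if 48 ≤ c.toNat ∧ c.toNat ≤ 57 then pvSups.getD (c.toNat - 48) c else c) := by
  induction l with
  | nil => rfl
  | cons c rest ih => simp [supLoop, ih]

-- ===== VERDICT =====
theorem to_super_spec : Claim_equal_to_super := by
  intro n _
  unfold Spec_to_super to_super to_super_alt
  simp only [List.foldl, str_replace_single, String.toList_ofList, List.map_map, supLoop_eq_map]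
  refine congrArg String.ofList ?_
  apply List.map_congr_left
  intro c _
  by_cases h1 : c = '1'; · subst h1; decide
  by_cases h2 : c = '2'; · subst h2; decide
  by_cases h3 : c = '3'; · subst h3; decide
  by_cases h4 : c = '4'; · subst h4; decide
  by_cases h5 : c = '5'; · subst h5; decide
  by_cases h6 : c = '6'; · subst h6; decide
  by_cases h7 : c = '7'; · subst h7; decide
  by_cases h8 : c = '8'; · subst h8; decide
  by_cases h9 : c = '9'; · subst h9; decide
  by_cases h0 : c = '0'; · subst h0; decide
  have e : ∀ d : Char, ¬ c = d → (c == d) = false :=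
    fun _ hd => beq_eq_false_iff_ne.mpr hd
  simp only [Function.comp_def,
    e _ h0, e _ h1, e _ h2, e _ h3, e _ h4, e _ h5, e _ h6, e _ h7, e _ h8, e _ h9,
    Bool.false_eq_true, if_false]
  -- c is not a digit: the range test fails
  rw [if_neg]
  rintro ⟨hlo, hhi⟩
  have key : ∀ k : Nat, c.toNat = k → c = Char.ofNat k := by
    intro k hk; rw [← hk, Char.ofNat_toNat]
  rcases (by omega :
      c.toNat = 48 ∨ c.toNat = 49 ∨ c.toNat = 50 ∨ c.toNat = 51 ∨ c.toNat = 52 ∨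
      c.toNat = 53 ∨ c.toNat = 54 ∨ c.toNat = 55 ∨ c.toNat = 56 ∨ c.toNat = 57)
    with h|h|h|h|h|h|h|h|h|h
  · exact h0 (key 48 h)
  · exact h1 (key 49 h)
  · exact h2 (key 50 h)
  · exact h3 (key 51 h)
  · exact h4 (key 52 h)
  · exact h5 (key 53 h)
  · exact h6 (key 54 h)
  · exact h7 (key 55 h)
  · exact h8 (key 56 h)
  · exact h9 (key 57 h)
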